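-- pv_equiv track=rewrite | github.com/raeez/chiral-bar-cobar | compute/lib/sc_koszul_dual_cooperad_engine.py | fm_poincare_polynomial
-- ===== SOURCE A (Python) =====
-- from typing import Any, Dict, List, Optional, Tuple
--
-- def fm_poincare_polynomial(n: int) -> List[int]:
--     """Poincare polynomial of H*(FM_n(C)): P(t) = prod_{j=1}^{n-1} (1+jt).
--
--     Returns coefficients [b_0, b_1, ..., b_{n-1}].
--     """
--     if n <= 0:
--         return []
--     if n == 1:
--         return [1]
--     poly = [1]
--     for j in range(1, n):
--         new_poly = [0] * (len(poly) + 1)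
--         for i, c in enumerate(poly):
--             new_poly[i] += c
--             new_poly[i + 1] += j * c
--         poly = new_poly
--     while len(poly) > 1 and poly[-1] == 0:
--         poly.pop()
--     return poly
-- ===== SOURCE B (Python) =====
-- def _conv(p, q):
--     """Coefficient list of the product of polynomials p and q (both nonempty)."""
--     return [sum(p[i] * q[k - i]
--                 for i in range(max(0, k - len(q) + 1), min(k + 1, len(p))))
--             for k in range(len(p) + len(q) - 1)]
--
--
-- def _prod_range(lo, hi):
--     """Coefficient list of prod_{j=lo}^{hi-1} (1 + j*t), by divide and conquer."""
--     if hi - lo <= 0: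
--         return [1]
--     if hi - lo == 1:
--         return [1, lo]
--     mid = (lo + hi) // 2
--     return _conv(_prod_range(lo, mid), _prod_range(mid, hi))
--
--
-- def fm_poincare_polynomial(n: int):
--     if n <= 0:
--         return []
--     if n == 1:
--         return [1]
--     return _prod_range(1, n)
-- ===== Notes on version B (the rewrite author's own statement) =====
-- stated objective: alternative
-- what changed: Replaces A's sequential in-place coefficient-update loop (multiply by one linear factor at a time, then trim trailing zeros) by a divide-and-conquer product over the factor range with an explicit closed-form convolution of coefficient lists.
import Mathlib
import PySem

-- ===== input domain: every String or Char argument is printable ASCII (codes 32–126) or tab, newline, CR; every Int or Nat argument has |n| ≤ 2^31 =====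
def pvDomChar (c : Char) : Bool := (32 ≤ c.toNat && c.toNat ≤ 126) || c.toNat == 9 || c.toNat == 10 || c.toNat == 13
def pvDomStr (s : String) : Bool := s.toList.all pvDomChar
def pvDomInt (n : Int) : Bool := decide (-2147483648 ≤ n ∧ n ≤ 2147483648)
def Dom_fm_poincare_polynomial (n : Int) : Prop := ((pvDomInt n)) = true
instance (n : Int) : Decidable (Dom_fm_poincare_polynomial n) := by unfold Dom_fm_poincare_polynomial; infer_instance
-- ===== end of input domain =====

-- B replaces A's sequential in-place factor-by-factor coefficient update by a divide-and-conquer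
-- product over the factor range with an explicit convolution (alternative decomposition, same cost).

-- ===== PORT A =====
-- A's trailing `while len(poly) > 1 and poly[-1] == 0: poly.pop()` loop
def pvTrimA (p : List Int) : List Int :=
  if 1 < p.length ∧ p.getLast? = some 0 then pvTrimA p.dropLast else p
termination_by p.length
decreasing_by
  rename_i h
  simp only [List.length_dropLast]
  omega

-- A's inner loop: new_poly = [0]*(len+1); for i, c in enumerate(poly): new_poly[i] += c; new_poly[i+1] += j*c
def pvStepA (j : Int) (poly : List Int) : List Int :=
  (poly.zipIdx).foldl
    (fun np ci =>
      let np1 := np.set ci.2 (np.getD ci.2 0 + ci.1)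
      np1.set (ci.2 + 1) (np1.getD (ci.2 + 1) 0 + j * ci.1))
    (List.replicate (poly.length + 1) 0)

def fm_poincare_polynomial (n : Int) : List Int :=
  if n ≤ 0 then []
  else if n = 1 then [1]
  else pvTrimA ((PySem.List.pyRange 1 n 1).foldl (fun poly j => pvStepA j poly) [1])

-- ===== PORT B =====
-- _conv: [sum(p[i]*q[k-i] for i in range(max(0, k-len(q)+1), min(k+1, len(p)))) for k in range(len(p)+len(q)-1)]
def pvConvB (p q : List Int) : List Int :=
  (List.range (p.length + q.length - 1)).map (fun k =>
    ((List.range' (max 0 (k + 1 - q.length)) (min (k + 1) p.length - max 0 (k + 1 - q.length))).map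
      (fun i => p.getD i 0 * q.getD (k - i) 0)).sum)

-- _prod_range: divide and conquer over the factor indices [lo, hi)
def pvProdDC (lo hi : Int) : List Int :=
  if hi - lo ≤ 0 then [1]
  else if hi - lo = 1 then [1, lo]
  else
    pvConvB (pvProdDC lo (PySem.Int.floordiv (lo + hi) 2))
            (pvProdDC (PySem.Int.floordiv (lo + hi) 2) hi)
termination_by (hi - lo).toNat
decreasing_by
  · rename_i h1 h2
    have hm : PySem.Int.floordiv (lo + hi) 2 = (lo + hi) / 2 :=
      PySem.Int.floordiv_eq_ediv_of_pos (by norm_num)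
    rw [hm]; omega
  · rename_i h1 h2
    have hm : PySem.Int.floordiv (lo + hi) 2 = (lo + hi) / 2 :=
      PySem.Int.floordiv_eq_ediv_of_pos (by norm_num)
    rw [hm]; omega

def fm_poincare_polynomial_alt (n : Int) : List Int :=
  if n ≤ 0 then []
  else if n = 1 then [1]
  else pvProdDC 1 n

-- ===== PRECONDITION & SPEC =====
def Spec_fm_poincare_polynomial (n : Int) (out : List Int) : Prop := out = fm_poincare_polynomial_alt n
instance (n : Int) (out : List Int) : Decidable (Spec_fm_poincare_polynomial n out) := by unfold Spec_fm_poincare_polynomial; infer_instance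

-- ===== CLAIM (what is proved, stated in full; the proofs are below) =====
def Claim_equal_fm_poincare_polynomial : Prop := ∀ (n : Int), Dom_fm_poincare_polynomial n → Spec_fm_poincare_polynomial n (fm_poincare_polynomial n)

-- ===== LEMMAS AND PROOFS =====

-- The mathematical meaning of a coefficient list (proof-only; the ports never use it)
noncomputable def pvToPoly (l : List Int) : Polynomial ℤ :=
  ∑ i ∈ Finset.range l.length, Polynomial.C (l.getD i 0) * Polynomial.X ^ i

-- The polynomial both programs compute for the factor range [lo, hi)
noncomputable def pvRangePoly (lo hi : Int) : Polynomial ℤ :=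
  ((PySem.List.pyRange lo hi 1).map (fun j => 1 + Polynomial.C j * Polynomial.X)).prod

theorem pvCoeff_toPoly (l : List Int) (k : ℕ) : (pvToPoly l).coeff k = l.getD k 0 := by
  unfold pvToPoly
  rw [Polynomial.finset_sum_coeff]
  simp only [Polynomial.coeff_C_mul, Polynomial.coeff_X_pow, mul_ite, mul_one, mul_zero]
  rw [Finset.sum_ite_eq (Finset.range l.length) k (fun i => l.getD i 0)]
  by_cases h : k < l.length
  · simp [h]
  · simp [h]

-- Two coefficient lists of the same length with the same polynomial are equal
theorem pvList_eq_of_toPoly (p q : List Int) (hl : p.length = q.length)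
    (h : pvToPoly p = pvToPoly q) : p = q := by
  apply List.ext_getElem hl
  intro i h1 h2
  have hc := congrArg (fun f => Polynomial.coeff f i) h
  simp only [pvCoeff_toPoly, List.getD_eq_getElem _ _ h1, List.getD_eq_getElem _ _ h2] at hc
  exact hc

-- A's inner loop computed functionally: multiply by (1 + j t), threading the carry j*c
def pvMulF (j : Int) : List Int → Int → List Int
  | [], carry => [carry]
  | c :: rest, carry => (carry + c) :: pvMulF j rest (j * c)

-- loop invariant of A's enumerate loop: processed prefix `pre`, current cell `carry`, zeros beyond
theorem pvStepA_loop (j : Int) (p : List Int) : ∀ (pre : List Int) (carry : Int),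
    (p.zipIdx pre.length).foldl
      (fun np ci =>
        let np1 := np.set ci.2 (np.getD ci.2 0 + ci.1)
        np1.set (ci.2 + 1) (np1.getD (ci.2 + 1) 0 + j * ci.1))
      (pre ++ carry :: List.replicate p.length 0)
      = pre ++ pvMulF j p carry := by
  induction p with
  | nil => intro pre carry; simp [pvMulF]
  | cons c rest ih =>
    intro pre carry
    rw [List.zipIdx_cons, List.foldl_cons]
    have hget1 : (pre ++ carry :: List.replicate (c :: rest).length 0).getD pre.length 0 = carry := by
      simp [List.getD]
    have hset1 : (pre ++ carry :: List.replicate (c :: rest).length 0).set pre.length (carry + c)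
        = pre ++ (carry + c) :: (0 : Int) :: List.replicate rest.length 0 := by
      rw [List.set_append]
      simp [List.replicate_succ]
    have hget2 : (pre ++ (carry + c) :: (0:Int) :: List.replicate rest.length 0).getD (pre.length + 1) 0 = 0 := by
      simp [List.getD]
    have hset2 : (pre ++ (carry + c) :: (0:Int) :: List.replicate rest.length 0).set (pre.length + 1) (0 + j * c)
        = (pre ++ [carry + c]) ++ (j * c) :: List.replicate rest.length 0 := by
      rw [List.set_append]
      simp
    simp only [hget1, hset1, hget2, hset2]
    have hpre : pre.length + 1 = (pre ++ [carry + c]).length := by simp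
    rw [hpre, ih (pre ++ [carry + c]) (j * c)]
    simp [pvMulF]

theorem pvStepA_eq_mulF (j : Int) (p : List Int) : pvStepA j p = pvMulF j p 0 := by
  have := pvStepA_loop j p [] 0
  simpa [pvStepA, List.replicate_succ] using this

theorem pvMulF_length (j : Int) (p : List Int) (carry : Int) :
    (pvMulF j p carry).length = p.length + 1 := by
  induction p generalizing carry with
  | nil => rfl
  | cons c rest ih => simp [pvMulF, ih]

theorem pvMulF_getD (j : Int) (p : List Int) (carry : Int) (k : ℕ) :
    (pvMulF j p carry).getD k 0
      = (if k = 0 then carry else j * p.getD (k - 1) 0) + p.getD k 0 := by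
  induction p generalizing carry k with
  | nil =>
    cases k with
    | zero => simp [pvMulF]
    | succ m => simp [pvMulF]
  | cons c rest ih =>
    cases k with
    | zero => simp [pvMulF]
    | succ m =>
      simp only [pvMulF, List.getD_cons_succ, ih]
      cases m with
      | zero => simp
      | succ m' => simp

theorem pvToPoly_mulF (j : Int) (p : List Int) :
    pvToPoly (pvMulF j p 0) = (1 + Polynomial.C j * Polynomial.X) * pvToPoly p := by
  apply Polynomial.ext
  intro k
  rw [pvCoeff_toPoly, pvMulF_getD]
  rw [add_mul, one_mul, mul_assoc, Polynomial.coeff_add, Polynomial.coeff_C_mul]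
  cases k with
  | zero =>
    rw [show ((Polynomial.X : Polynomial ℤ) * pvToPoly p).coeff 0 = 0 by simp [Polynomial.mul_coeff_zero]]
    simp [pvCoeff_toPoly]
  | succ m =>
    rw [Polynomial.coeff_X_mul]
    simp [pvCoeff_toPoly, add_comm]

theorem pvMulF_getLast (j : Int) (p : List Int) (carry x : Int) (h : p.getLast? = some x) :
    (pvMulF j p carry).getLast? = some (j * x) := by
  induction p generalizing carry with
  | nil => simp at h
  | cons c rest ih =>
    cases rest with
    | nil =>
      simp at h
      simp [pvMulF, h]
    | cons d tl =>
      rw [List.getLast?_cons_cons] at h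
      have := ih (j * c) h
      simp only [pvMulF] at this ⊢
      rw [List.getLast?_cons_cons]
      exact this

theorem pvFold_toPoly (js : List Int) : ∀ (p : List Int),
    pvToPoly (js.foldl (fun poly j => pvStepA j poly) p)
      = pvToPoly p * (js.map (fun j => 1 + Polynomial.C j * Polynomial.X)).prod := by
  induction js with
  | nil => intro p; simp
  | cons j js ih =>
    intro p
    rw [List.foldl_cons, ih, pvStepA_eq_mulF, pvToPoly_mulF]
    simp [List.prod_cons]
    ring

theorem pvFold_length (js : List Int) : ∀ (p : List Int),
    (js.foldl (fun poly j => pvStepA j poly) p).length = p.length + js.length := by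
  induction js with
  | nil => intro p; simp
  | cons j js ih =>
    intro p
    rw [List.foldl_cons, ih, pvStepA_eq_mulF, pvMulF_length]
    simp; omega

theorem pvFold_getLast (js : List Int) : ∀ (p : List Int) (x : Int), p.getLast? = some x →
    (js.foldl (fun poly j => pvStepA j poly) p).getLast? = some (js.prod * x) := by
  induction js with
  | nil => intro p x h; simpa using h
  | cons j js ih =>
    intro p x h
    rw [List.foldl_cons, pvStepA_eq_mulF]
    rw [ih _ (j * x) (pvMulF_getLast j p 0 x h)]
    rw [List.prod_cons]
    ring_nf

theorem pvTrimA_eq_self (p : List Int) (x : Int) (h : p.getLast? = some x) (hx : x ≠ 0) :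
    pvTrimA p = p := by
  rw [pvTrimA]
  rw [if_neg]
  rintro ⟨-, h2⟩
  rw [h] at h2
  exact hx (by injection h2)

theorem pvSum_range' (f : ℕ → Int) (a n : ℕ) :
    ((List.range' a n).map f).sum = ∑ i ∈ Finset.Ico a (a + n), f i := by
  rw [Finset.sum_Ico_eq_sum_range]
  simp only [Nat.add_sub_cancel_left]
  induction n generalizing a with
  | zero => simp
  | succ m ih =>
    rw [List.range'_succ, List.map_cons, List.sum_cons, ih (a + 1), Finset.sum_range_succ']
    rw [add_comm]
    congr 1
    · apply Finset.sum_congr rfl; intro x _; congr 1; omega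

theorem pvConvB_length (p q : List Int) :
    (pvConvB p q).length = p.length + q.length - 1 := by
  simp [pvConvB]

-- every coefficient of the convolution is the untruncated Cauchy-product sum
theorem pvConvB_getD (p q : List Int) (hp : p ≠ []) (hq : q ≠ []) (k : ℕ) :
    (pvConvB p q).getD k 0 = ∑ i ∈ Finset.range (k + 1), p.getD i 0 * q.getD (k - i) 0 := by
  have hp1 : 1 ≤ p.length := List.length_pos_iff.mpr hp
  have hq1 : 1 ≤ q.length := List.length_pos_iff.mpr hq
  by_cases hk : k < p.length + q.length - 1
  · rw [List.getD_eq_getElem _ _ (by simpa [pvConvB_length] using hk)]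
    unfold pvConvB
    rw [List.getElem_map, List.getElem_range, pvSum_range']
    set lo := max 0 (k + 1 - q.length) with hlo
    set hi := min (k + 1) p.length with hhi
    rw [show lo + (hi - lo) = hi by omega]
    apply Finset.sum_subset
    · intro i hi'
      simp only [Finset.mem_Ico] at hi'
      simp only [Finset.mem_range]
      omega
    · intro i hi1 hi2
      simp only [Finset.mem_range] at hi1
      simp only [Finset.mem_Ico, not_and_or, not_le, not_lt] at hi2
      rcases hi2 with h | h
      · rw [List.getD_eq_default q _ (by omega)]; ring
      · rw [List.getD_eq_default p _ (by omega)]; ring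
  · rw [List.getD_eq_default _ _ (by simpa [pvConvB_length] using hk)]
    symm
    apply Finset.sum_eq_zero
    intro i hi
    simp only [Finset.mem_range] at hi
    by_cases hip : i < p.length
    · rw [List.getD_eq_default q _ (by omega)]
      ring
    · rw [List.getD_eq_default p _ (by omega)]
      ring

theorem pvToPoly_convB (p q : List Int) (hp : p ≠ []) (hq : q ≠ []) :
    pvToPoly (pvConvB p q) = pvToPoly p * pvToPoly q := by
  apply Polynomial.ext
  intro k
  rw [pvCoeff_toPoly, pvConvB_getD p q hp hq, Polynomial.coeff_mul,
    Finset.Nat.sum_antidiagonal_eq_sum_range_succ_mk]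
  apply Finset.sum_congr rfl
  intro i _
  rw [pvCoeff_toPoly, pvCoeff_toPoly]

theorem pvProdDC_spec (lo hi : Int) :
    (pvProdDC lo hi).length = (hi - lo).toNat + 1 ∧
      pvToPoly (pvProdDC lo hi) = pvRangePoly lo hi := by
  induction lo, hi using pvProdDC.induct with
  | case1 lo hi h =>
    rw [pvProdDC, if_pos h]
    constructor
    · simp; omega
    · have : PySem.List.pyRange lo hi 1 = [] := by
        rw [PySem.List.pyRange_one]
        simp [show (hi - lo).toNat = 0 by omega]
      simp [pvRangePoly, this, pvToPoly]
  | case2 lo hi h1 h2 =>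
    rw [pvProdDC, if_neg h1, if_pos h2]
    constructor
    · simp; omega
    · have : PySem.List.pyRange lo hi 1 = [lo] := by
        rw [PySem.List.pyRange_one]
        simp [show (hi - lo).toNat = 1 by omega]
      simp [pvRangePoly, this, pvToPoly, Finset.sum_range_succ]
  | case3 lo hi h1 h2 ih1 ih2 =>
    rw [pvProdDC, if_neg h1, if_neg h2]
    have hm : PySem.Int.floordiv (lo + hi) 2 = (lo + hi) / 2 :=
      PySem.Int.floordiv_eq_ediv_of_pos (by norm_num)
    set mid := PySem.Int.floordiv (lo + hi) 2 with hmid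
    have hlom : lo ≤ mid := by rw [hm]; omega
    have hmhi : mid ≤ hi := by rw [hm]; omega
    obtain ⟨l1, t1⟩ := ih1
    obtain ⟨l2, t2⟩ := ih2
    have hne1 : pvProdDC lo mid ≠ [] := by
      intro hc; rw [hc] at l1; simp at l1
    have hne2 : pvProdDC mid hi ≠ [] := by
      intro hc; rw [hc] at l2; simp at l2
    constructor
    · rw [pvConvB_length, l1, l2]; omega
    · rw [pvToPoly_convB _ _ hne1 hne2, t1, t2]
      unfold pvRangePoly
      rw [PySem.List.pyRange_one_append lo mid hi hlom hmhi]
      rw [List.map_append, List.prod_append]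

-- ===== VERDICT (by name: the statement is the Claim_ definition above) =====
theorem fm_poincare_polynomial_spec : Claim_equal_fm_poincare_polynomial := by
  intro n _
  unfold Spec_fm_poincare_polynomial fm_poincare_polynomial fm_poincare_polynomial_alt
  by_cases h0 : n ≤ 0
  · simp [h0]
  by_cases h1 : n = 1
  · simp [h1]
  rw [if_neg h0, if_neg h1, if_neg h0, if_neg h1]
  set js := PySem.List.pyRange 1 n 1 with hjs
  set L := js.foldl (fun poly j => pvStepA j poly) [1] with hL
  have hjlen : js.length = (n - 1).toNat := PySem.List.length_pyRange_one 1 n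
  have hlast : L.getLast? = some (js.prod * 1) := pvFold_getLast js [1] 1 (by simp)
  have hpos : (0:Int) < js.prod := by
    apply List.prod_pos
    intro a ha
    rw [hjs, PySem.List.mem_pyRange_one] at ha
    omega
  have htrim : pvTrimA L = L := pvTrimA_eq_self L (js.prod * 1) hlast (by
    intro hc; rw [mul_one] at hc; omega)
  rw [htrim]
  obtain ⟨hBl, hBt⟩ := pvProdDC_spec 1 n
  apply pvList_eq_of_toPoly
  · rw [pvFold_length, hBl]
    simp [hjlen]; omega
  · rw [pvFold_toPoly, hBt]
    have : pvToPoly [1] = 1 := by simp [pvToPoly]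
    rw [this, one_mul]
    rfl
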